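-- pv_equiv track=rewrite | github.com/AdamZhouSE/pythonHomework | Code/CodeRecords/2939/60652/251790.py | dele
-- ===== SOURCE A (Python) =====
-- def dele(a, N):
--     if N == 0:
--         return a
--     else:
--         for i in range(0, len(a) - 1):
--             if a[i] < a[i + 1]:
--                 a.pop(i)
--                 break
--         return dele(a, N - 1)
-- ===== SOURCE B (Python) =====
-- def dele(a, N):
--     # Single left-to-right pass with a monotonic stack and a removal budget,
--     # instead of A's N repeated scan-and-pop passes. Return-value equivalence
--     # only: A mutates its argument in place, B does not.
--     budget = N
--     stack = []
--     for x in a: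
--         while budget > 0 and stack and stack[-1] < x:
--             stack.pop()
--             budget -= 1
--         stack.append(x)
--     return stack
-- ===== Notes on version B (the rewrite author's own statement) =====
-- stated objective: faster
-- what changed: Replaced A's N-fold recursion, each pass rescanning the list to pop the first element smaller than its right neighbour, by one left-to-right monotonic-stack pass with a removal budget of N.
-- crash fix: A recurses N+1 frames deep and raises RecursionError for N < 0 (no base case reached) and for N at or beyond the interpreter's recursion headroom (measured threshold 9993 under the checker's limit of 10000); B's single pass returns there (for N < 0 the list unchanged). — e.g. on dele([1, 2], -1): A raises RecursionError, B returns [1, 2]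
import Mathlib
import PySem

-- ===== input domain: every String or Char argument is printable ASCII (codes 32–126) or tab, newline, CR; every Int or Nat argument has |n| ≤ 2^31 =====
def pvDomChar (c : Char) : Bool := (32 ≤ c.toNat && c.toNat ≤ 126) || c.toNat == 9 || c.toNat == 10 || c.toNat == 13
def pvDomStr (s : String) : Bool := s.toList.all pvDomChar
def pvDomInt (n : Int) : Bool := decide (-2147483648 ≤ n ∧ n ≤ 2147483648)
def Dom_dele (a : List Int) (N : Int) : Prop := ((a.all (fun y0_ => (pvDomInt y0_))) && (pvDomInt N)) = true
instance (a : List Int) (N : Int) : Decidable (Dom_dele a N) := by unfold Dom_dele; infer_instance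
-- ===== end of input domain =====

-- B replaces A's N repeated scan-and-pop passes by one monotonic-stack pass with a
-- removal budget (objective: faster). A mutates its argument in place, B does not:
-- the equivalence proved here is about the RETURN value only.

-- ===== PORT A =====
-- A's inner for-loop: scan adjacent pairs left to right, pop the left element of the
-- first ascending pair and break; if no such pair, leave the list unchanged.
def popA : List Int → List Int
  | [] => []
  | [x] => [x]
  | x :: y :: r => if x < y then y :: r else x :: popA (y :: r)

-- A's recursion on N (Python recurses with N-1 until N == 0; for N < 0 the Python
-- never reaches the base case and raises RecursionError, excluded by Pre_, so the
-- fuel is N.toNat).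
def deleGo : List Int → Nat → List Int
  | a, 0 => a
  | a, n + 1 => deleGo (popA a) n

def dele (a : List Int) (N : Int) : List Int := deleGo a N.toNat

-- ===== PORT B =====
-- B's inner while-loop: pop stack elements smaller than x while budget remains.
def popWhile (x : Int) : List Int → Int → List Int × Int
  | [], b => ([], b)
  | t :: s, b => if 0 < b ∧ t < x then popWhile x s (b - 1) else (t :: s, b)

-- B's loop body: state is (stack in reverse = head is top, budget).
def altStep (st : List Int × Int) (x : Int) : List Int × Int :=
  let p := popWhile x st.1 st.2
  (x :: p.1, p.2)

def dele_alt (a : List Int) (N : Int) : List Int :=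
  (a.foldl altStep (([] : List Int), N)).1.reverse

-- ===== PRECONDITION & SPEC =====
-- A recurses N+1 frames deep, so it raises RecursionError for N < 0 (its base case
-- is never reached) and for N at or beyond the interpreter's recursion headroom
-- (the recursion limit minus the ambient stack depth; 9993 is the measured
-- threshold under the checker's recursion limit of 10000). Pre_ excludes exactly
-- those raising inputs; see Raises_dele below.
def Pre_dele (a : List Int) (N : Int) : Prop := 0 ≤ N ∧ N < 9993
instance (a : List Int) (N : Int) : Decidable (Pre_dele a N) := by unfold Pre_dele; infer_instance

def pvWitness_dele : List Int × Int := ([5, 1, 9, 3, 4], 2)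

-- Where A raises RecursionError (N < 0: no base case; N ≥ 9993: recursion
-- deeper than the interpreter's headroom) B returns a value: for N < 0 the list
-- unchanged (budget exhausted), for large N its single pass still terminates.
def Raises_dele (a : List Int) (N : Int) : Prop := N < 0 ∨ 9993 ≤ N
instance (a : List Int) (N : Int) : Decidable (Raises_dele a N) := by unfold Raises_dele; infer_instance
def pvRaiseWitness_dele : List Int × Int := ([1, 2], -1)
def pvRaiseWitnessOut_dele : List Int := [1, 2]

def Spec_dele (a : List Int) (N : Int) (out : List Int) : Prop := out = dele_alt a N
instance (a : List Int) (N : Int) (out : List Int) : Decidable (Spec_dele a N out) := by unfold Spec_dele; infer_instance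

-- ===== CLAIM (what is proved, stated in full; the proofs are below) =====
def Claim_equal_dele : Prop := ∀ (a : List Int) (N : Int), Dom_dele a N → Pre_dele a N → Spec_dele a N (dele a N)
def Claim_raises_dele : Prop := (∀ (a : List Int) (N : Int), Dom_dele a N → Raises_dele a N → ¬ Pre_dele a N) ∧ (Dom_dele (pvRaiseWitness_dele.1) (pvRaiseWitness_dele.2) ∧ Raises_dele (pvRaiseWitness_dele.1) (pvRaiseWitness_dele.2) ∧ dele_alt (pvRaiseWitness_dele.1) (pvRaiseWitness_dele.2) = pvRaiseWitnessOut_dele)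

-- ===== LEMMAS AND PROOFS =====

-- With no budget left, popWhile pops nothing.
theorem popWhile_nonpos (x : Int) (s : List Int) (b : Int) (hb : b ≤ 0) :
    popWhile x s b = (s, b) := by
  cases s with
  | nil => rfl
  | cons t s' => simp [popWhile]; omega

-- If the stack top is ≥ x, popWhile pops nothing.
theorem popWhile_ge (x : Int) (s : List Int) (b : Int)
    (h : ∀ t, s.head? = some t → x ≤ t) :
    popWhile x s b = (s, b) := by
  cases s with
  | nil => rfl
  | cons t s' =>
    have := h t (by rfl)
    simp [popWhile]; omega

-- With budget ≤ 0 the fold just pushes everything.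
theorem foldl_nopop : ∀ (l s : List Int) (b : Int), b ≤ 0 →
    List.foldl altStep (s, b) l = (l.reverse ++ s, b) := by
  intro l
  induction l with
  | nil => intro s b hb; simp
  | cons x r ih =>
    intro s b hb
    simp only [List.foldl_cons, altStep, popWhile_nonpos x s b hb]
    rw [ih (x :: s) b hb]
    simp

-- Main simulation lemma: one unit of budget corresponds to one pass of A's popA,
-- provided the current stack top dominates the next input element.
theorem gen : ∀ (l s : List Int) (b : Int), 0 ≤ b →
    (∀ t h, s.head? = some t → l.head? = some h → h ≤ t) →
    (List.foldl altStep (s, b + 1) l).1 = (List.foldl altStep (s, b) (popA l)).1 := by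
  intro l
  induction l with
  | nil => intro s b _ _; rfl
  | cons h1 t ih =>
    intro s b hb hhd
    have hpop1 : ∀ c : Int, popWhile h1 s c = (s, c) := fun c =>
      popWhile_ge h1 s c (fun t ht => hhd t h1 ht rfl)
    cases t with
    | nil =>
      simp [popA, altStep, hpop1]
    | cons h2 r =>
      by_cases hlt : h1 < h2
      · -- popA removes h1; both folds reach the identical state before r
        have e1 : List.foldl altStep (s, b + 1) (h1 :: h2 :: r)
            = List.foldl altStep (altStep (altStep (s, b + 1) h1) h2) r := rfl
        have e2 : altStep (s, b + 1) h1 = (h1 :: s, b + 1) := by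
          simp [altStep, hpop1]
        have e3 : altStep (h1 :: s, b + 1) h2 = altStep (s, b) h2 := by
          simp only [altStep]
          have : popWhile h2 (h1 :: s) (b + 1) = popWhile h2 s b := by
            rw [popWhile]
            simp only [if_pos (by constructor <;> omega : 0 < b + 1 ∧ h1 < h2)]
            norm_num
          rw [this]
        rw [e1, e2, e3]
        simp [popA, hlt]
      · -- popA keeps h1; both folds push h1 and we recurse on h2 :: r
        simp only [popA, if_neg hlt, List.foldl_cons, altStep, hpop1]
        exact ih (h1 :: s) b hb (by intro t h ht hh; simp at ht hh; omega)

-- One unit of budget = one A-pass, at the top level.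
theorem dele_alt_succ (a : List Int) (b : Int) (hb : 0 ≤ b) :
    dele_alt a (b + 1) = dele_alt (popA a) b := by
  unfold dele_alt
  rw [gen a [] b hb (by intro t h ht; simp at ht)]

-- B with budget n equals n passes of A.
theorem dele_alt_eq_go : ∀ (n : Nat) (a : List Int), dele_alt a (n : Int) = deleGo a n := by
  intro n
  induction n with
  | zero =>
    intro a
    unfold dele_alt
    rw [Nat.cast_zero, foldl_nopop a [] 0 le_rfl]
    simp [deleGo]
  | succ n ih =>
    intro a
    have : ((n + 1 : Nat) : Int) = (n : Int) + 1 := by push_cast; ring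
    rw [this, dele_alt_succ a n (by positivity), ih (popA a)]
    rfl

-- ===== VERDICT (by name: the statement is the Claim_ definition above) =====
theorem dele_spec : Claim_equal_dele := by
  intro a N _ hpre
  unfold Spec_dele dele
  have h0 : (N.toNat : Int) = N := Int.toNat_of_nonneg hpre.1
  rw [← h0, dele_alt_eq_go]
  rw [h0]

@[simp]
theorem dele_raises : Claim_raises_dele := by
  unfold Claim_raises_dele
  exact ⟨by intro a N _ hr hp; unfold Raises_dele at hr; unfold Pre_dele at hp; omega, by decide⟩
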